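-- pv_equiv track=rewrite | github.com/ImJinGyu/PP.github.io | swap_panels.py | extract_panel
-- ===== SOURCE A (Python) =====
-- def extract_panel(html, pid):
--     opener = '<div class="case-panel" id="' + pid + '">'
--     s = html.find(opener)
--     if s == -1:
--         return None, -1, -1
--     body_start = s + len(opener)
--     depth = 1
--     i = body_start
--     while i < len(html) and depth > 0:
--         o = html.find('<div', i)
--         c = html.find('</div>', i)
--         if o == -1:
--             o = len(html)
--         if c == -1:
--             break
--         if o < c:
--             depth += 1
--             i = o + 4
--         else:
--             depth -= 1
--             if depth == 0:
--                 return html[body_start:c], s, c + 6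
--             i = c + 6
--     return None, -1, -1
-- ===== SOURCE B (Python) =====
-- def extract_panel(html, pid):
--     opener = '<div class="case-panel" id="' + pid + '">'
--     s = html.find(opener)
--     if s == -1:
--         return None, -1, -1
--     body_start = s + len(opener)
--     depth = 1
--     j = body_start
--     while j < len(html):
--         if html.startswith('</div>', j):
--             depth -= 1
--             if depth == 0:
--                 return html[body_start:j], s, j + 6
--             j += 6
--         elif html.startswith('<div', j):
--             depth += 1
--             j += 4
--         else:
--             j += 1
--     return None, -1, -1
-- ===== Notes on version B (the rewrite author's own statement) =====
-- stated objective: alternative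
-- what changed: Replaces A's per-iteration pair of html.find scans for '<div' and '</div>' (each rescanning ahead from the current position) with a single left-to-right pointer walk that tests startswith at each position and tracks depth in one pass.
import Mathlib
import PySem

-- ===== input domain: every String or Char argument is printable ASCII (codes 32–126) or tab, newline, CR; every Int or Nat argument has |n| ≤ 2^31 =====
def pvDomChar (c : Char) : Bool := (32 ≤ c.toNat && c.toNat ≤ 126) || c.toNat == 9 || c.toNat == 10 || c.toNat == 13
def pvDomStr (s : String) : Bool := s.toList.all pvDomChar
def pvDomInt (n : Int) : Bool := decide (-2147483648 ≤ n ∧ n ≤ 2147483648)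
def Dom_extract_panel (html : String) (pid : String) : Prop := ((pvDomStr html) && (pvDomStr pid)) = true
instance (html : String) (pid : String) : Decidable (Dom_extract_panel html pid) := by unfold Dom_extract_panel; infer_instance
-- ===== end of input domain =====

-- B replaces A's per-iteration pair of html.find scans by a single left-to-right pointer walk
-- with startswith tests; the return value is proved equal. (Both loops are written with a fuel
-- counter, a plain totality guard: each Python iteration strictly advances the index, so
-- h.length + 1 rounds always suffice.)

-- shared literal tags ('<div' and '</div>'), used by both ports as data
def pvOpenTag : List Char := ['<', 'd', 'i', 'v']
def pvCloseTag : List Char := ['<', '/', 'd', 'i', 'v', '>']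

-- ===== PORT A =====
-- html.find('<div', i) and html.find('</div>', i)
def pvFindO (h : List Char) (i : Nat) : Int := PySem.Chars.findFrom h pvOpenTag (i : Int) none
def pvFindC (h : List Char) (i : Nat) : Int := PySem.Chars.findFrom h pvCloseTag (i : Int) none
-- 'if o == -1: o = len(html)'
def pvOAdj (h : List Char) (i : Nat) : Int := if pvFindO h i = -1 then (h.length : Int) else pvFindO h i

-- the while-loop of A (state i, depth)
def pvLoopA (h : List Char) (bs : Nat) (s : Int) (fuel : Nat) (i : Nat) (depth : Int) :
    Option String × Int × Int :=
  match fuel with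
  | 0 => (none, -1, -1)
  | fuel + 1 =>
    if i < h.length ∧ 0 < depth then
      if pvFindC h i = -1 then (none, -1, -1)
      else if pvOAdj h i < pvFindC h i then
        pvLoopA h bs s fuel ((pvOAdj h i).toNat + 4) (depth + 1)
      else if depth - 1 = 0 then
        (some (String.ofList (PySem.Chars.slice h (some (bs : Int)) (some (pvFindC h i)))), s,
          pvFindC h i + 6)
      else pvLoopA h bs s fuel ((pvFindC h i).toNat + 6) (depth - 1)
    else (none, -1, -1)

def extract_panel (html : String) (pid : String) : Option String × Int × Int :=
  let h := html.toList
  let opener := ("<div class=\"case-panel\" id=\"" ++ pid ++ "\">").toList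
  let s := PySem.Chars.find h opener
  if s = -1 then (none, -1, -1)
  else pvLoopA h (s.toNat + opener.length) s (h.length + 1) (s.toNat + opener.length) 1

-- ===== PORT B =====
-- the while-loop of B: one pointer j, prefix tests at j
-- (html.startswith(tok, j) with 0 ≤ j is exactly 'startswith (h.drop j) tok')
def pvLoopB (h : List Char) (bs : Nat) (s : Int) (fuel : Nat) (j : Nat) (depth : Int) :
    Option String × Int × Int :=
  match fuel with
  | 0 => (none, -1, -1)
  | fuel + 1 =>
    if j < h.length then
      if PySem.Chars.startswith (h.drop j) pvCloseTag then
        if depth - 1 = 0 then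
          (some (String.ofList (PySem.Chars.slice h (some (bs : Int)) (some (j : Int)))), s,
            (j : Int) + 6)
        else pvLoopB h bs s fuel (j + 6) (depth - 1)
      else if PySem.Chars.startswith (h.drop j) pvOpenTag then
        pvLoopB h bs s fuel (j + 4) (depth + 1)
      else pvLoopB h bs s fuel (j + 1) depth
    else (none, -1, -1)

def extract_panel_alt (html : String) (pid : String) : Option String × Int × Int :=
  let h := html.toList
  let opener := ("<div class=\"case-panel\" id=\"" ++ pid ++ "\">").toList
  let s := PySem.Chars.find h opener
  if s = -1 then (none, -1, -1)
  else pvLoopB h (s.toNat + opener.length) s (h.length + 1) (s.toNat + opener.length) 1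

-- ===== PRECONDITION & SPEC =====
def Spec_extract_panel (html : String) (pid : String) (out : Option String × Int × Int) : Prop := out = extract_panel_alt html pid
instance (html : String) (pid : String) (out : Option String × Int × Int) : Decidable (Spec_extract_panel html pid out) := by unfold Spec_extract_panel; infer_instance

-- ===== CLAIM (what is proved, stated in full; the proofs are below) =====
def Claim_equal_extract_panel : Prop := ∀ (html : String) (pid : String), Dom_extract_panel html pid → Spec_extract_panel html pid (extract_panel html pid)

-- ===== LEMMAS AND PROOFS =====

-- sub occurs somewhere in h.drop i iff it is a prefix of some h.drop (i+j)
lemma pv_isIn_drop_of_prefix (h sub : List Char) (i m : Nat) (him : i ≤ m)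
    (hp : sub <+: h.drop m) : PySem.Chars.isIn sub (h.drop i) = true := by
  rw [← PySem.Chars.exists_prefix_drop_iff_isIn]
  exact ⟨m - i, by rwa [List.drop_drop, Nat.add_sub_cancel' him]⟩

lemma pv_prefix_of_isIn (h sub : List Char) (i : Nat)
    (hin : PySem.Chars.isIn sub (h.drop i) = true) : ∃ j, sub <+: h.drop (i + j) := by
  rw [← PySem.Chars.exists_prefix_drop_iff_isIn] at hin
  obtain ⟨j, hj⟩ := hin
  exact ⟨j, by rwa [List.drop_drop] at hj⟩

lemma pv_isIn_drop_mono (h sub : List Char) {i i' : Nat} (hle : i ≤ i')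
    (hno : PySem.Chars.isIn sub (h.drop i) = false) :
    PySem.Chars.isIn sub (h.drop i') = false := by
  rw [PySem.Chars.isIn_eq_false_iff] at hno ⊢
  intro hinf
  apply hno
  have hdd : (h.drop i).drop (i' - i) = h.drop i' := by
    rw [List.drop_drop, Nat.add_sub_cancel' hle]
  exact hinf.trans (hdd ▸ (List.drop_suffix (i' - i) (h.drop i)).isInfix)

-- findFrom characterised: the first prefix position ≥ i
lemma pv_findFrom_eq_of (h sub : List Char) (i m : Nat) (hi : i ≤ h.length) (him : i ≤ m)
    (hp : sub <+: h.drop m) (hmin : ∀ j, i ≤ j → j < m → ¬ sub <+: h.drop j) :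
    PySem.Chars.findFrom h sub (i : Int) none = (m : Int) := by
  have hne : PySem.Chars.findFrom h sub (i : Int) none ≠ -1 := fun he =>
    ((PySem.Chars.findFrom_natCast_eq_neg_one_iff h sub i hi).1 he)
      ((PySem.Chars.isIn_iff_infix sub (h.drop i)).1
        (pv_isIn_drop_of_prefix h sub i m him hp))
  obtain ⟨hle, hpre, hmin'⟩ := PySem.Chars.findFrom_natCast_spec h sub i hi hne
  set r := PySem.Chars.findFrom h sub (i : Int) none with hr
  have hr0 : 0 ≤ r := le_trans (by exact_mod_cast Nat.zero_le i) hle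
  have hiN : i ≤ r.toNat := by omega
  rcases Nat.lt_trichotomy r.toNat m with hlt | heq | hgt
  · exact absurd hpre (hmin r.toNat hiN hlt)
  · omega
  · exact absurd hp (hmin' m him hgt)

-- skipping a position where sub is not a prefix does not change findFrom
lemma pv_findFrom_step (h sub : List Char) (i : Nat) (hi : i < h.length)
    (hnp : ¬ sub <+: h.drop i) :
    PySem.Chars.findFrom h sub (i : Int) none = PySem.Chars.findFrom h sub ((i + 1 : Nat) : Int) none := by
  have hi1 : i + 1 ≤ h.length := hi
  by_cases hne : PySem.Chars.findFrom h sub ((i + 1 : Nat) : Int) none = -1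
  · rw [hne, PySem.Chars.findFrom_natCast_eq_neg_one_iff h sub i (Nat.le_of_lt hi)]
    replace hne := (PySem.Chars.findFrom_natCast_eq_neg_one_iff h sub (i + 1) hi1).1 hne
    intro hinf
    obtain ⟨j, hj⟩ := pv_prefix_of_isIn h sub i ((PySem.Chars.isIn_iff_infix sub (h.drop i)).2 hinf)
    rcases Nat.eq_zero_or_pos j with hj0 | hjp
    · exact hnp (by simpa [hj0] using hj)
    · exact hne ((PySem.Chars.isIn_iff_infix sub (h.drop (i + 1))).1
        (pv_isIn_drop_of_prefix h sub (i + 1) (i + j) (by omega) hj))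
  · obtain ⟨hle, hpre, hmin⟩ := PySem.Chars.findFrom_natCast_spec h sub (i + 1) hi1 hne
    set r := PySem.Chars.findFrom h sub ((i + 1 : Nat) : Int) none with hr
    have hr0 : 0 ≤ r := le_trans (by exact_mod_cast Nat.zero_le (i + 1)) hle
    have : PySem.Chars.findFrom h sub (i : Int) none = (r.toNat : Int) := by
      apply pv_findFrom_eq_of h sub i r.toNat (Nat.le_of_lt hi) (by omega) hpre
      intro j hij hjlt
      rcases Nat.eq_or_lt_of_le hij with rfl | hlt
      · exact hnp
      · exact hmin j hlt hjlt
    rw [this]; omega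

-- the findFrom facts restated on A's helper names (so all hypotheses share one atom)
lemma pvFindC_spec (h : List Char) (i : Nat) (hi : i ≤ h.length) (hne : pvFindC h i ≠ -1) :
    (i : Int) ≤ pvFindC h i ∧ pvCloseTag <+: h.drop (pvFindC h i).toNat ∧
      ∀ j, i ≤ j → j < (pvFindC h i).toNat → ¬ pvCloseTag <+: h.drop j :=
  PySem.Chars.findFrom_natCast_spec h pvCloseTag i hi hne

lemma pvFindO_spec (h : List Char) (i : Nat) (hi : i ≤ h.length) (hne : pvFindO h i ≠ -1) :
    (i : Int) ≤ pvFindO h i ∧ pvOpenTag <+: h.drop (pvFindO h i).toNat ∧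
      ∀ j, i ≤ j → j < (pvFindO h i).toNat → ¬ pvOpenTag <+: h.drop j :=
  PySem.Chars.findFrom_natCast_spec h pvOpenTag i hi hne

lemma pvFindC_ne_of_isIn (h : List Char) (i : Nat) (hi : i ≤ h.length)
    (hin : PySem.Chars.isIn pvCloseTag (h.drop i) = true) : pvFindC h i ≠ -1 := fun he =>
  ((PySem.Chars.findFrom_natCast_eq_neg_one_iff h pvCloseTag i hi).1 he)
    ((PySem.Chars.isIn_iff_infix _ _).1 hin)

lemma pvFindC_eq_of (h : List Char) (i m : Nat) (hi : i ≤ h.length) (him : i ≤ m)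
    (hp : pvCloseTag <+: h.drop m) (hmin : ∀ j, i ≤ j → j < m → ¬ pvCloseTag <+: h.drop j) :
    pvFindC h i = (m : Int) :=
  pv_findFrom_eq_of h pvCloseTag i m hi him hp hmin

lemma pvFindO_eq_of (h : List Char) (i m : Nat) (hi : i ≤ h.length) (him : i ≤ m)
    (hp : pvOpenTag <+: h.drop m) (hmin : ∀ j, i ≤ j → j < m → ¬ pvOpenTag <+: h.drop j) :
    pvFindO h i = (m : Int) :=
  pv_findFrom_eq_of h pvOpenTag i m hi him hp hmin

-- '<div' and '</div>' cannot both be prefixes at the same position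
lemma pv_not_both (l : List Char) (hO : pvOpenTag <+: l) (hC : pvCloseTag <+: l) : False := by
  rcases l with _ | ⟨a, _ | ⟨b, t⟩⟩ <;>
    simp [pvOpenTag, pvCloseTag, List.cons_prefix_cons] at hO hC
  exact absurd (hO.2.1 ▸ hC.2.1) (by decide)

-- a prefix of h.drop m with 6 chars needs m + 6 ≤ h.length
lemma pv_close_prefix_bound (h : List Char) (m : Nat) (hp : pvCloseTag <+: h.drop m) :
    m + 6 ≤ h.length := by
  have := hp.length_le
  simp [pvCloseTag, List.length_drop] at this
  omega

-- if no '</div>' occurs at or after j, B's walk returns the failure triple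
lemma pv_loopB_none (h : List Char) (bs : Nat) (s : Int) :
    ∀ fuel j depth, h.length - j < fuel → PySem.Chars.isIn pvCloseTag (h.drop j) = false →
      pvLoopB h bs s fuel j depth = (none, -1, -1) := by
  intro fuel
  induction fuel with
  | zero => intro j depth hn _; omega
  | succ n ih =>
    intro j depth hn hno
    show (if j < h.length then _ else _) = _
    by_cases hj : j < h.length
    · rw [if_pos hj]
      have hnc : PySem.Chars.startswith (h.drop j) pvCloseTag = false := by
        cases hsw : PySem.Chars.startswith (h.drop j) pvCloseTag
        · rfl
        · have := pv_isIn_drop_of_prefix h pvCloseTag j j le_rfl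
            ((PySem.Chars.startswith_iff _ _).1 hsw)
          simp [this] at hno
      rw [hnc]
      simp only [Bool.false_eq_true, if_false]
      split
      · exact ih (j + 4) (depth + 1) (by omega) (pv_isIn_drop_mono h pvCloseTag (by omega) hno)
      · exact ih (j + 1) depth (by omega) (pv_isIn_drop_mono h pvCloseTag (by omega) hno)
    · rw [if_neg hj]

-- one silent step of A's loop (neither tag is a prefix at i, but a closer exists later)
lemma pv_loopA_step (h : List Char) (bs : Nat) (s : Int) (fuel i : Nat) (depth : Int)
    (hi : i < h.length) (hnO : ¬ pvOpenTag <+: h.drop i) (hnC : ¬ pvCloseTag <+: h.drop i)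
    (hin : PySem.Chars.isIn pvCloseTag (h.drop i) = true) :
    pvLoopA h bs s (fuel + 1) i depth = pvLoopA h bs s (fuel + 1) (i + 1) depth := by
  have hcne : pvFindC h i ≠ -1 := pvFindC_ne_of_isIn h i (Nat.le_of_lt hi) hin
  obtain ⟨hcle, hcpre, _⟩ := pvFindC_spec h i (Nat.le_of_lt hi) hcne
  have hcni : (pvFindC h i).toNat ≠ i := fun he => hnC (he ▸ hcpre)
  have hbound : (pvFindC h i).toNat + 6 ≤ h.length := pv_close_prefix_bound h _ hcpre
  have hi1 : i + 1 < h.length := by omega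
  have heO : pvFindO h i = pvFindO h (i + 1) := pv_findFrom_step h pvOpenTag i hi hnO
  have heC : pvFindC h i = pvFindC h (i + 1) := pv_findFrom_step h pvCloseTag i hi hnC
  show (if i < h.length ∧ 0 < depth then _ else _) =
    (if i + 1 < h.length ∧ 0 < depth then _ else _)
  by_cases hd : 0 < depth
  · rw [if_pos (⟨hi, hd⟩ : i < h.length ∧ 0 < depth),
      if_pos (⟨hi1, hd⟩ : i + 1 < h.length ∧ 0 < depth)]
    simp only [pvOAdj, heO, heC]
  · rw [if_neg (by omega : ¬ (i < h.length ∧ 0 < depth)),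
      if_neg (by omega : ¬ (i + 1 < h.length ∧ 0 < depth))]

-- the main invariant: from the same position, with enough fuel on both sides and positive
-- depth, the two loops agree
lemma pv_loop_eq (h : List Char) (bs : Nat) (s : Int) :
    ∀ n fA fB i depth, h.length - i ≤ n → h.length - i < fA → h.length - i < fB → 0 < depth →
      pvLoopA h bs s fA i depth = pvLoopB h bs s fB i depth := by
  intro n
  induction n with
  | zero =>
    intro fA fB i depth hn hfA hfB _
    obtain ⟨fA, rfl⟩ : ∃ k, fA = k + 1 := ⟨fA - 1, by omega⟩
    obtain ⟨fB, rfl⟩ : ∃ k, fB = k + 1 := ⟨fB - 1, by omega⟩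
    show (if i < h.length ∧ 0 < depth then _ else _) = (if i < h.length then _ else _)
    rw [if_neg (by omega : ¬ (i < h.length ∧ 0 < depth)), if_neg (by omega : ¬ i < h.length)]
  | succ n ih =>
    intro fA fB i depth hn hfA hfB hd
    obtain ⟨fA, rfl⟩ : ∃ k, fA = k + 1 := ⟨fA - 1, by omega⟩
    obtain ⟨fB, rfl⟩ : ∃ k, fB = k + 1 := ⟨fB - 1, by omega⟩
    by_cases hi : i < h.length
    · by_cases hin : PySem.Chars.isIn pvCloseTag (h.drop i) = true
      · -- a closer exists at or after i
        have hcne : pvFindC h i ≠ -1 := pvFindC_ne_of_isIn h i (Nat.le_of_lt hi) hin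
        obtain ⟨hcle, hcpre, hcmin⟩ := pvFindC_spec h i (Nat.le_of_lt hi) hcne
        have hc0 : 0 ≤ pvFindC h i := le_trans (by exact_mod_cast Nat.zero_le i) hcle
        have hbound : (pvFindC h i).toNat + 6 ≤ h.length := pv_close_prefix_bound h _ hcpre
        by_cases hC : pvCloseTag <+: h.drop i
        · -- '</div>' right here: c = i
          have hcEq : pvFindC h i = (i : Int) :=
            pvFindC_eq_of h i i (Nat.le_of_lt hi) le_rfl hC (by omega)
          have hnO : ¬ pvOpenTag <+: h.drop i := fun hO => pv_not_both _ hO hC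
          have hoge : ¬ pvOAdj h i < pvFindC h i := by
            unfold pvOAdj
            split
            · rw [hcEq]; omega
            · obtain ⟨hole, hopre, _⟩ := pvFindO_spec h i (Nat.le_of_lt hi) (by assumption)
              have hone : (pvFindO h i).toNat ≠ i := fun he => hnO (he ▸ hopre)
              rw [hcEq]; omega
          show (if i < h.length ∧ 0 < depth then _ else _) = (if i < h.length then _ else _)
          rw [if_pos (⟨hi, hd⟩ : i < h.length ∧ 0 < depth), if_pos hi,
            if_neg (by rw [hcEq]; omega : ¬ pvFindC h i = -1), if_neg hoge,
            if_pos ((PySem.Chars.startswith_iff _ _).2 hC)]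
          by_cases hd1 : depth - 1 = 0
          · rw [if_pos hd1, if_pos hd1, hcEq]
          · rw [if_neg hd1, if_neg hd1, hcEq]
            have : ((i : Int).toNat + 6) = i + 6 := by omega
            rw [this]
            exact ih fA fB (i + 6) (depth - 1) (by omega) (by omega) (by omega) (by omega)
        · have hcgt : i < (pvFindC h i).toNat := by
            have : (pvFindC h i).toNat ≠ i := fun he => hC (he ▸ hcpre)
            omega
          by_cases hO : pvOpenTag <+: h.drop i
          · -- '<div' right here: o = i < c
            have hoEq : pvFindO h i = (i : Int) :=
              pvFindO_eq_of h i i (Nat.le_of_lt hi) le_rfl hO (by omega)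
            have hadj : pvOAdj h i = (i : Int) := by
              unfold pvOAdj
              rw [hoEq, if_neg (by omega : ¬ (i : Int) = -1)]
            show (if i < h.length ∧ 0 < depth then _ else _) = (if i < h.length then _ else _)
            rw [if_pos (⟨hi, hd⟩ : i < h.length ∧ 0 < depth), if_pos hi,
              if_neg (by omega : ¬ pvFindC h i = -1),
              if_pos (by rw [hadj]; omega : pvOAdj h i < pvFindC h i),
              if_neg (by
                rw [Bool.not_eq_true, Bool.eq_false_iff]
                exact fun hsw => hC ((PySem.Chars.startswith_iff _ _).1 hsw)),
              if_pos ((PySem.Chars.startswith_iff _ _).2 hO)]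
            have : (pvOAdj h i).toNat + 4 = i + 4 := by rw [hadj]; omega
            rw [this]
            exact ih fA fB (i + 4) (depth + 1) (by omega) (by omega) (by omega) (by omega)
          · -- neither tag here: both loops slide one position
            have hstep := pv_loopA_step h bs s fA i depth hi hO hC hin
            have hB : pvLoopB h bs s (fB + 1) i depth = pvLoopB h bs s fB (i + 1) depth := by
              show (if i < h.length then _ else _) = _
              rw [if_pos hi,
                if_neg (by
                  rw [Bool.not_eq_true, Bool.eq_false_iff]
                  exact fun hsw => hC ((PySem.Chars.startswith_iff _ _).1 hsw)),
                if_neg (by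
                  rw [Bool.not_eq_true, Bool.eq_false_iff]
                  exact fun hsw => hO ((PySem.Chars.startswith_iff _ _).1 hsw))]
            rw [hstep, hB]
            exact ih (fA + 1) fB (i + 1) depth (by omega) (by omega) (by omega) hd
      · -- no closer at or after i: A bails out at once, B walks to the end
        have hno : PySem.Chars.isIn pvCloseTag (h.drop i) = false := by
          rw [Bool.eq_false_iff]; exact hin
        have hcEq : pvFindC h i = -1 :=
          (PySem.Chars.findFrom_natCast_eq_neg_one_iff h pvCloseTag i (Nat.le_of_lt hi)).2
            ((PySem.Chars.isIn_eq_false_iff _ _).1 hno)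
        show (if i < h.length ∧ 0 < depth then _ else _) = _
        rw [if_pos (⟨hi, hd⟩ : i < h.length ∧ 0 < depth), if_pos hcEq,
          pv_loopB_none h bs s (fB + 1) i depth (by omega) hno]
    · show (if i < h.length ∧ 0 < depth then _ else _) = (if i < h.length then _ else _)
      rw [if_neg (by omega : ¬ (i < h.length ∧ 0 < depth)), if_neg (by omega : ¬ i < h.length)]

-- ===== VERDICT (by name: the statement is the Claim_ definition above) =====
theorem extract_panel_spec : Claim_equal_extract_panel := by
  intro html pid _
  unfold Spec_extract_panel extract_panel extract_panel_alt
  simp only []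
  split
  · rfl
  · exact pv_loop_eq html.toList _ _ html.toList.length _ _ _ 1
      (by omega) (by omega) (by omega) (by omega)
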